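-- pv_equiv track=rewrite | github.com/chetanis/TALN | server/app.py | process_tokens_with_boundaries
-- ===== SOURCE A (Python) =====
-- def process_tokens_with_boundaries(tokens):
--     """Insert sentence boundary tokens <s> and </s> around sentences."""
--     processed = []
--     previous_token = '.'
--     for token in tokens:
--         if token in ['.', '?', '!']:
--             processed.append('</s>')
--         elif previous_token in ['.', '?', '!']:
--             processed.append('<s>')
--             processed.append(token)
--         else:
--             processed.append(token)
--         previous_token = token
--
--     return processed
-- ===== SOURCE B (Python) =====
-- BOUND = ('.', '?', '!')
--
-- def _span(pred, xs):
--     i = 0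
--     while i < len(xs) and pred(xs[i]):
--         i += 1
--     return xs[:i], xs[i:]
--
-- def process_tokens_with_boundaries(tokens):
--     """Insert sentence boundary tokens <s> and </s> around sentences."""
--     out = []
--     rest = tokens
--     while rest:
--         if rest[0] in BOUND:
--             run, rest = _span(lambda t: t in BOUND, rest)
--             out += ['</s>'] * len(run)
--         else:
--             run, rest = _span(lambda t: t not in BOUND, rest)
--             out.append('<s>')
--             out += run
--     return out
-- ===== Notes on version B (the rewrite author's own statement) =====
-- stated objective: alternative
-- what changed: B partitions the token list into maximal runs of boundary vs non-boundary tokens and emits each run wholesale ('</s>' per boundary token, '<s>' plus the run for sentences), instead of A's per-token loop carrying a previous-token flag.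
import Mathlib
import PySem

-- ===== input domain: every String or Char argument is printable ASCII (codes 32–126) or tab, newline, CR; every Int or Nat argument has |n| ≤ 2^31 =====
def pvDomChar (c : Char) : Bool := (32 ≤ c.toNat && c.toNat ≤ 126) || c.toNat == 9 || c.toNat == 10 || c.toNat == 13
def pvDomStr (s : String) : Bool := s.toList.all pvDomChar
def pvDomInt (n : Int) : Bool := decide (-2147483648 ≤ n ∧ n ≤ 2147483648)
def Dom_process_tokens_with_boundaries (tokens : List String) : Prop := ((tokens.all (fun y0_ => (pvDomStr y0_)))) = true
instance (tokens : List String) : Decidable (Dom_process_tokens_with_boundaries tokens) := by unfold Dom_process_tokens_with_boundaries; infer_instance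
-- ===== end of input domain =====

-- B emits maximal runs of boundary / non-boundary tokens group-wise instead of A's per-token loop with a previous-token flag (alternative decomposition, same cost).


-- ===== PORT A =====
-- A: single pass, state = (processed list, previous token), previous initialised to ".".
def process_tokens_with_boundaries (tokens : List String) : List String :=
  (tokens.foldl (fun (st : List String × String) token =>
      if token = "." ∨ token = "?" ∨ token = "!" then (st.1 ++ ["</s>"], token)
      else if st.2 = "." ∨ st.2 = "?" ∨ st.2 = "!" then (st.1 ++ ["<s>", token], token)
      else (st.1 ++ [token], token))
    ([], ".")).1

-- ===== PORT B =====
-- B: membership in the tuple BOUND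
def pvIsBound (t : String) : Bool := t == "." || t == "?" || t == "!"

-- B: consume a maximal run per step (_span = takeWhile/dropWhile)
def process_tokens_with_boundaries_alt (tokens : List String) : List String :=
  match tokens with
  | [] => []
  | t :: ts =>
    if pvIsBound t then
      (List.takeWhile pvIsBound (t :: ts)).map (fun _ => "</s>")
        ++ process_tokens_with_boundaries_alt (List.dropWhile pvIsBound (t :: ts))
    else
      "<s>" :: (List.takeWhile (fun x => !pvIsBound x) (t :: ts)
        ++ process_tokens_with_boundaries_alt (List.dropWhile (fun x => !pvIsBound x) (t :: ts)))
  termination_by tokens.length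
  decreasing_by
  · simp only [List.dropWhile_cons, *, if_true]
    exact Nat.lt_succ_of_le (List.length_dropWhile_le _ _)
  · simp only [List.dropWhile_cons, *]
    exact Nat.lt_succ_of_le (List.length_dropWhile_le _ _)

-- ===== PRECONDITION & SPEC =====
def Spec_process_tokens_with_boundaries (tokens : List String) (out : List String) : Prop := out = process_tokens_with_boundaries_alt tokens
instance (tokens : List String) (out : List String) : Decidable (Spec_process_tokens_with_boundaries tokens out) := by unfold Spec_process_tokens_with_boundaries; infer_instance

-- ===== CLAIM (what is proved, stated in full; the proofs are below) =====
def Claim_equal_process_tokens_with_boundaries : Prop := ∀ (tokens : List String), Dom_process_tokens_with_boundaries tokens → Spec_process_tokens_with_boundaries tokens (process_tokens_with_boundaries tokens)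

-- ===== LEMMAS AND PROOFS =====

-- A rewritten as structural recursion on the list with the previous token as a parameter.
def pvRunA (prev : String) : List String → List String
  | [] => []
  | t :: ts =>
    (if pvIsBound t then ["</s>"]
     else if pvIsBound prev then ["<s>", t]
     else [t]) ++ pvRunA t ts

-- continuation inside a non-boundary run (no fresh "<s>")
def pvCont : List String → List String
  | [] => []
  | t :: ts => if pvIsBound t then process_tokens_with_boundaries_alt (t :: ts) else t :: pvCont ts

theorem pvIsBound_iff (t : String) :
    pvIsBound t = true ↔ (t = "." ∨ t = "?" ∨ t = "!") := by
  simp [pvIsBound]; tauto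

theorem pvCont_eq (ts : List String) :
    pvCont ts = ts.takeWhile (fun x => !pvIsBound x)
      ++ process_tokens_with_boundaries_alt (ts.dropWhile (fun x => !pvIsBound x)) := by
  induction ts with
  | nil => simp [pvCont, process_tokens_with_boundaries_alt]
  | cons t ts ih =>
    by_cases h : pvIsBound t = true <;>
      simp [pvCont, h, ih]

theorem alt_bound_cons (t : String) (ts : List String) (h : pvIsBound t = true) :
    process_tokens_with_boundaries_alt (t :: ts) = "</s>" :: process_tokens_with_boundaries_alt ts := by
  rw [process_tokens_with_boundaries_alt]
  simp only [h, if_true, List.takeWhile_cons, List.dropWhile_cons, List.map_cons, List.cons_append]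
  congr 1
  induction ts with
  | nil => simp [process_tokens_with_boundaries_alt]
  | cons u us ih =>
    by_cases hu : pvIsBound u = true
    · rw [process_tokens_with_boundaries_alt]
      simp [hu]
    · simp [hu]

theorem alt_nonbound_cons (t : String) (ts : List String) (h : ¬ pvIsBound t = true) :
    process_tokens_with_boundaries_alt (t :: ts) = "<s>" :: t :: pvCont ts := by
  rw [process_tokens_with_boundaries_alt]
  simp [h, pvCont_eq]

theorem runA_eq (ts : List String) : ∀ prev : String,
    pvRunA prev ts = if pvIsBound prev then process_tokens_with_boundaries_alt ts else pvCont ts := by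
  induction ts with
  | nil => intro prev; simp [pvRunA, process_tokens_with_boundaries_alt, pvCont]
  | cons t ts ih =>
    intro prev
    by_cases ht : pvIsBound t = true
    · have : pvRunA prev (t :: ts) = "</s>" :: process_tokens_with_boundaries_alt ts := by
        simp [pvRunA, ht, ih t]
      rw [this]
      by_cases hp : pvIsBound prev = true
      · simp [hp, alt_bound_cons t ts ht]
      · simp [hp, pvCont, ht, alt_bound_cons t ts ht]
    · have hrec : pvRunA t ts = pvCont ts := by simp [ih t, ht]
      by_cases hp : pvIsBound prev = true
      · simp [pvRunA, ht, hp, hrec, alt_nonbound_cons t ts ht]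
      · simp [pvRunA, ht, hp, hrec, pvCont]

theorem foldl_runA (ts : List String) : ∀ (acc : List String) (prev : String),
    (ts.foldl (fun (st : List String × String) token =>
        if token = "." ∨ token = "?" ∨ token = "!" then (st.1 ++ ["</s>"], token)
        else if st.2 = "." ∨ st.2 = "?" ∨ st.2 = "!" then (st.1 ++ ["<s>", token], token)
        else (st.1 ++ [token], token))
      (acc, prev)).1 = acc ++ pvRunA prev ts := by
  induction ts with
  | nil => intro acc prev; simp [pvRunA]
  | cons t ts ih =>
    intro acc prev
    by_cases ht : t = "." ∨ t = "?" ∨ t = "!"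
    · have hb : pvIsBound t = true := (pvIsBound_iff t).2 ht
      simp [List.foldl_cons, ht, ih, pvRunA, hb]
    · have hb : ¬ pvIsBound t = true := fun h => ht ((pvIsBound_iff t).1 h)
      by_cases hp : prev = "." ∨ prev = "?" ∨ prev = "!"
      · have hpb : pvIsBound prev = true := (pvIsBound_iff prev).2 hp
        simp [List.foldl_cons, ht, hp, ih, pvRunA, hb, hpb]
      · have hpb : ¬ pvIsBound prev = true := fun h => hp ((pvIsBound_iff prev).1 h)
        simp [List.foldl_cons, ht, hp, ih, pvRunA, hb, hpb]

-- ===== VERDICT (by name: the statement is the Claim_ definition above) =====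
theorem process_tokens_with_boundaries_spec : Claim_equal_process_tokens_with_boundaries := by
  intro tokens _
  unfold Spec_process_tokens_with_boundaries process_tokens_with_boundaries
  rw [foldl_runA, runA_eq]
  simp [pvIsBound]
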